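-- pv_equiv track=rewrite | github.com/haizelabs/tourno | scripts/tulu-experiments/plot_abilities.py | short_label
-- ===== SOURCE A (Python) =====
-- def short_label(crit: str) -> str:
--     if len(crit) <= 18:
--         return crit
--     words = crit.split()
--     mid = len(words) // 2
--     while mid < len(words) and sum(len(w) + 1 for w in words[:mid]) < 14:
--         mid += 1
--     return " ".join(words[:mid]) + "\n" + " ".join(words[mid:])
-- ===== SOURCE B (Python) =====
-- def short_label(crit: str) -> str:
--     if len(crit) <= 18:
--         return crit
--     words = crit.split()
--     mid0 = len(words) // 2
--     # single forward pass: j = first index (1-based) where the running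
--     # width reaches 14, defaulting to len(words)
--     total = 0
--     j = 0
--     for w in words:
--         total += len(w) + 1
--         j += 1
--         if total >= 14:
--             break
--     mid = max(mid0, j)
--     return " ".join(words[:mid]) + "\n" + " ".join(words[mid:])
-- ===== Notes on version B (the rewrite author's own statement) =====
-- stated objective: alternative
-- what changed: Replaces the while-loop that re-computes the prefix sum of word widths from scratch on every iteration with a single forward pass accumulating the running width, taking mid = max(len(words)//2, first index where the width reaches 14).
import Mathlib
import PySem

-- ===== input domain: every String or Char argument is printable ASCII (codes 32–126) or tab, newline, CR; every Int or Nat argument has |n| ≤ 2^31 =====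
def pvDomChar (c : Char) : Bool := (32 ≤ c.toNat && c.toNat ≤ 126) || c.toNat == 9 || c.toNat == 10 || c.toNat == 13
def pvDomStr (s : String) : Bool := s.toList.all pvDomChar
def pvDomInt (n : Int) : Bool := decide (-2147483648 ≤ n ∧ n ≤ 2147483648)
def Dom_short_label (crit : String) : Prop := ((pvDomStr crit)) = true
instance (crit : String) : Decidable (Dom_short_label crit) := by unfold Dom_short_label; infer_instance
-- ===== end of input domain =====

-- B replaces A's while-loop (which re-sums the word-length prefix on every iteration)
-- by one linear forward accumulation finding the first index where the running width
-- reaches 14, then takes max with len(words)//2; objective: alternative (not measurably faster).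


-- ===== PORT A =====
-- the while loop: `while mid < len(words) and sum(len(w) + 1 for w in words[:mid]) < 14: mid += 1`
-- (mid starts at len(words)//2 ≥ 0 and only grows, so it is kept as a Nat and
-- words[:mid] is words.take mid, exact for a nonnegative bound)
def pvLoopA (words : List String) (mid : Nat) : Nat :=
  if h : mid < words.length ∧ ((words.take mid).map (fun w => PySem.Str.len w + 1)).sum < 14
  then pvLoopA words (mid + 1)
  else mid
termination_by words.length - mid
decreasing_by omega

def short_label (crit : String) : String :=
  if PySem.Str.len crit ≤ 18 then crit
  else
    let words := PySem.Str.split₀ crit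
    let mid := pvLoopA words (words.length / 2)
    PySem.Str.join " " (words.take mid) ++ "\n" ++ PySem.Str.join " " (words.drop mid)

-- ===== PORT B =====
-- the single forward pass of Source B: running total of len(w)+1 with a counter j,
-- breaking at the first index where total >= 14; returns that j (len(words) if never)
def pvFindJ : List String → Int → Nat
  | [], _ => 0
  | w :: rest, total =>
    let t := total + PySem.Str.len w + 1
    if 14 ≤ t then 1 else 1 + pvFindJ rest t

def short_label_alt (crit : String) : String :=
  if PySem.Str.len crit ≤ 18 then crit
  else
    let words := PySem.Str.split₀ crit
    let mid := max (words.length / 2) (pvFindJ words 0)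
    PySem.Str.join " " (words.take mid) ++ "\n" ++ PySem.Str.join " " (words.drop mid)

-- ===== PRECONDITION & SPEC =====
def Spec_short_label (crit : String) (out : String) : Prop := out = short_label_alt crit
instance (crit : String) (out : String) : Decidable (Spec_short_label crit out) := by unfold Spec_short_label; infer_instance

-- ===== CLAIM (what is proved, stated in full; the proofs are below) =====
def Claim_equal_short_label : Prop := ∀ (crit : String), Dom_short_label crit → Spec_short_label crit (short_label crit)

-- ===== LEMMAS AND PROOFS =====

-- running prefix width of the first m words
def pvS (ws : List String) (m : Nat) : Int :=
  ((ws.take m).map (fun w => PySem.Str.len w + 1)).sum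

lemma pvS_zero (ws : List String) : pvS ws 0 = 0 := rfl

lemma pvS_cons_succ (w : String) (ws : List String) (m : Nat) :
    pvS (w :: ws) (m + 1) = (PySem.Str.len w + 1) + pvS ws m := by
  simp [pvS]

lemma pvFindJ_le_length (ws : List String) (total : Int) :
    pvFindJ ws total ≤ ws.length := by
  induction ws generalizing total with
  | nil => simp [pvFindJ]
  | cons w rest ih =>
    simp only [pvFindJ, List.length_cons]
    split
    · omega
    · have := ih (total + PySem.Str.len w + 1)
      omega

lemma pvFindJ_le_of_ge (ws : List String) (total : Int) (m : Nat)
    (htot : total < 14) (h : 14 ≤ total + pvS ws m) :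
    pvFindJ ws total ≤ m := by
  induction ws generalizing total m with
  | nil => simp [pvFindJ]
  | cons w rest ih =>
    simp only [pvFindJ]
    split
    · -- returns 1; need 1 ≤ m, i.e. m ≠ 0
      cases m with
      | zero => rw [pvS_zero] at h; omega
      | succ m' => omega
    · rename_i ht
      cases m with
      | zero => rw [pvS_zero] at h; omega
      | succ m' =>
        rw [pvS_cons_succ] at h
        have := ih (total + PySem.Str.len w + 1) m' (by omega) (by omega)
        omega

lemma pvLen_nonneg (w : String) : 0 ≤ PySem.Str.len w := by
  rw [PySem.Str.len_eq]; positivity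

lemma pvFindJ_gt_of_lt (ws : List String) (total : Int) (m : Nat)
    (hm : m < ws.length) (h : total + pvS ws m < 14) :
    m + 1 ≤ pvFindJ ws total := by
  induction ws generalizing total m with
  | nil => simp at hm
  | cons w rest ih =>
    simp only [pvFindJ]
    split
    · -- returns 1; need m = 0
      rename_i ht
      cases m with
      | zero => omega
      | succ m' =>
        rw [pvS_cons_succ] at h
        have h0 : 0 ≤ pvS rest m' := by
          have : ∀ x ∈ (rest.take m').map (fun w => PySem.Str.len w + 1), 0 ≤ x := by
            intro x hx
            simp only [List.mem_map] at hx
            obtain ⟨w', _, rfl⟩ := hx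
            have := pvLen_nonneg w'; omega
          exact List.sum_nonneg this
        omega
    · cases m with
      | zero => omega
      | succ m' =>
        rw [pvS_cons_succ] at h
        have := ih (total + PySem.Str.len w + 1) m'
          (by simpa using Nat.lt_of_succ_lt_succ hm) (by omega)
        omega

lemma pvLoopA_eq (ws : List String) (mid : Nat) :
    pvLoopA ws mid = max mid (pvFindJ ws 0) := by
  fun_induction pvLoopA ws mid with
  | case1 mid h ih =>
    have hj : mid + 1 ≤ pvFindJ ws 0 := by
      have := pvFindJ_gt_of_lt ws 0 mid h.1 (by simpa [pvS] using h.2)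
      omega
    omega
  | case2 mid h =>
    rcases Nat.lt_or_ge mid ws.length with hlt | hge
    · have h14 : 14 ≤ pvS ws mid := by
        by_contra hc
        exact h ⟨hlt, by simpa [pvS] using not_le.mp hc⟩
      have := pvFindJ_le_of_ge ws 0 mid (by omega) (by omega)
      omega
    · have := pvFindJ_le_length ws 0
      omega

-- ===== VERDICT (by name: the statement is the Claim_ definition above) =====
theorem short_label_spec : Claim_equal_short_label := by
  intro crit _
  unfold Spec_short_label short_label short_label_alt
  split
  · rfl
  · simp only [pvLoopA_eq]
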